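-- pv_equiv track=rewrite | github.com/keaz/aicore | scripts/selfhost/retirement_reference_scan.py | token_from_pattern
-- ===== SOURCE A (Python) =====
-- GLOB_CHARS = "*?["
--
-- def has_glob(pattern: str) -> bool:
--     return any(char in pattern for char in GLOB_CHARS)
--
-- def token_from_pattern(pattern: str) -> str:
--     if not has_glob(pattern):
--         return pattern
--     indexes = [pattern.index(char) for char in GLOB_CHARS if char in pattern]
--     prefix = pattern[: min(indexes)]
--     slash = prefix.rfind("/")
--     if slash >= 0:
--         return prefix[: slash + 1]
--     return prefix or pattern
-- ===== SOURCE B (Python) =====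
-- GLOB_CHARS = "*?["
--
-- def token_from_pattern(pattern: str) -> str:
--     last_slash = -1
--     cut = -1
--     for i, ch in enumerate(pattern):
--         if ch in GLOB_CHARS:
--             cut = i
--             break
--         if ch == "/":
--             last_slash = i
--     if cut < 0:
--         return pattern
--     if last_slash >= 0:
--         return pattern[:last_slash + 1]
--     return pattern[:cut] if cut > 0 else pattern
-- ===== Notes on version B (the rewrite author's own statement) =====
-- stated objective: alternative
-- what changed: B replaces A's multi-scan pipeline (has_glob membership test, per-glob-char first-index list, min, slice, rfind) by one left-to-right scan with early termination that tracks the most recent path-separator position and cuts at the first glob character.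
import Mathlib
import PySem

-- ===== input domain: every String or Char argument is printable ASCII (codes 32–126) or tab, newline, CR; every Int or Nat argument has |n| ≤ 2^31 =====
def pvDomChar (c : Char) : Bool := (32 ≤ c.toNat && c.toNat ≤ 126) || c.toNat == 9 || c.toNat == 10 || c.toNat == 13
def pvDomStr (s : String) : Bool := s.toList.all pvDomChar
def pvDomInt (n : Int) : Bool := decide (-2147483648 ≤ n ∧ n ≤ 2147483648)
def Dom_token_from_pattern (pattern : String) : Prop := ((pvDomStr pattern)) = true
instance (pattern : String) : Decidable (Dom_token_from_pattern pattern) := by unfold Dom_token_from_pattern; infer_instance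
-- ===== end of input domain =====

-- B: one left-to-right scan with early termination (track the last path separator, cut at the first glob char)
-- instead of A's has_glob test + per-char first-index list + min + rfind; alternative, not claimed faster.

-- ===== PORT A =====
def pvGlobChars : List Char := ['*', '?', '[']

def has_glob (pattern : String) : Bool :=
  pvGlobChars.any (fun c => PySem.Str.isIn (String.ofList [c]) pattern)

def token_from_pattern (pattern : String) : String :=
  if !(has_glob pattern) then pattern
  else
    let indexes : List Int :=
      (pvGlobChars.filter (fun c => PySem.Str.isIn (String.ofList [c]) pattern)).map
        (fun c => PySem.Str.find pattern (String.ofList [c]))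
    -- min(indexes): indexes is nonempty here (has_glob guard), so the getD default is never used
    let pre := PySem.Str.slice pattern none (some ((PySem.List.min? indexes id).getD 0))
    let slash := PySem.Str.rfind pre "/"
    if slash ≥ 0 then PySem.Str.slice pre none (some (slash + 1))
    else if pre ≠ "" then pre else pattern

-- ===== PORT B =====
-- the for-loop of Source B with its break, as structural recursion; returns (cut, last_slash)
def pvScan : List Char → Nat → Int → Int × Int
  | [], _, lastSlash => (-1, lastSlash)
  | c :: rest, i, lastSlash =>
    if pvGlobChars.contains c then ((i : Int), lastSlash)
    else pvScan rest (i + 1) (if c = '/' then (i : Int) else lastSlash)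

def token_from_pattern_alt (pattern : String) : String :=
  let r := pvScan pattern.toList 0 (-1)
  if r.1 < 0 then pattern
  else if r.2 ≥ 0 then PySem.Str.slice pattern none (some (r.2 + 1))
  else if r.1 > 0 then PySem.Str.slice pattern none (some r.1)
  else pattern

-- ===== PRECONDITION & SPEC =====
def Spec_token_from_pattern (pattern : String) (out : String) : Prop := out = token_from_pattern_alt pattern
instance (pattern : String) (out : String) : Decidable (Spec_token_from_pattern pattern out) := by unfold Spec_token_from_pattern; infer_instance

-- ===== CLAIM (what is proved, stated in full; the proofs are below) =====
def Claim_equal_token_from_pattern : Prop := ∀ (pattern : String), Dom_token_from_pattern pattern → Spec_token_from_pattern pattern (token_from_pattern pattern)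

-- ===== LEMMAS AND PROOFS =====

-- abbreviations for the proofs
def pvG (c : Char) : Bool := pvGlobChars.contains c

def pvP (c : Char) : Bool := !(pvG c)

-- last index ≤ n at which c occurs (mirrors rfind.go's downward recursion)
def pvLastTo (s : List Char) (c : Char) : Nat → Int
  | 0 => if s[0]? = some c then 0 else -1
  | n + 1 => if s[n + 1]? = some c then ((n : Int) + 1) else pvLastTo s c n

-- last index of c, structurally
def pvLi? (c : Char) : List Char → Option Nat
  | [] => none
  | x :: t =>
    match pvLi? c t with
    | some j => some (j + 1)
    | none => if x = c then some 0 else none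

-- Source B's last_slash accumulator, isolated
def pvLsAcc : List Char → Nat → Int → Int
  | [], _, ls => ls
  | x :: t, i, ls => pvLsAcc t (i + 1) (if x = '/' then (i : Int) else ls)

theorem pv_singleton_infix_iff (c : Char) (l : List Char) : [c] <:+: l ↔ c ∈ l := by
  constructor
  · intro h; exact h.subset (by simp)
  · intro h
    obtain ⟨s, t, rfl⟩ := List.append_of_mem h
    exact ⟨s, t, by simp⟩

theorem pv_singleton_prefix_iff (c : Char) (l : List Char) : [c] <+: l ↔ l[0]? = some c := by
  cases l with
  | nil => simp
  | cons x t => simp [List.cons_prefix_cons, eq_comm]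

theorem pv_has_glob_iff (pattern : String) :
    has_glob pattern = true ↔ pattern.toList.any pvG = true := by
  simp only [has_glob, List.any_eq_true, PySem.Str.isIn_iff_infix, pvG, List.contains_iff_mem]
  constructor
  · rintro ⟨c, hc, hinf⟩
    have := (pv_singleton_infix_iff c pattern.toList).1 (by simpa using hinf)
    exact ⟨c, this, hc⟩
  · rintro ⟨c, hc, hg⟩
    exact ⟨c, hg, by simpa using (pv_singleton_infix_iff c pattern.toList).2 hc⟩

-- characterisation of Chars.find on a singleton sub present in the string
theorem pv_find_singleton (cs : List Char) (c : Char) (hmem : c ∈ cs) :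
    ∃ j : Nat, PySem.Chars.find cs [c] = (j : Int) ∧ cs[j]? = some c ∧
      ∀ i < j, cs[i]? ≠ some c := by
  have hinf : [c] <:+: cs := (pv_singleton_infix_iff c cs).2 hmem
  have h0 : 0 ≤ PySem.Chars.find cs [c] := (PySem.Chars.find_nonneg_iff cs [c]).2 hinf
  obtain ⟨hpre, hmin⟩ := PySem.Chars.find_spec h0
  refine ⟨(PySem.Chars.find cs [c]).toNat, by omega, ?_, ?_⟩
  · have := (pv_singleton_prefix_iff c _).1 hpre
    simpa [List.getElem?_drop] using this
  · intro i hi hc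
    exact hmin i hi ((pv_singleton_prefix_iff c _).2 (by simpa [List.getElem?_drop] using hc))

-- takeWhile facts
theorem pv_tw_eq_take (cs : List Char) :
    cs.takeWhile pvP = cs.take (cs.takeWhile pvP).length :=
  List.prefix_iff_eq_take.1 (List.takeWhile_prefix pvP)

theorem pv_tw_getElem? (cs : List Char) (j : Nat) (hj : j < (cs.takeWhile pvP).length) :
    cs[j]? = (cs.takeWhile pvP)[j]? := by
  conv_rhs => rw [pv_tw_eq_take cs]
  rw [List.getElem?_take_of_lt hj]

theorem pv_tw_not_glob (cs : List Char) (j : Nat) (hj : j < (cs.takeWhile pvP).length)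
    {c : Char} (hc : cs[j]? = some c) : pvG c = false := by
  rw [pv_tw_getElem? cs j hj] at hc
  have hmem : c ∈ cs.takeWhile pvP := by
    have := List.getElem?_eq_some_iff.1 hc
    obtain ⟨h, rfl⟩ := this
    exact List.getElem_mem h
  have := List.mem_takeWhile_imp hmem
  simpa [pvP] using this

theorem pv_k_lt (cs : List Char) (hg : cs.any pvG = true) :
    (cs.takeWhile pvP).length < cs.length := by
  rcases Nat.lt_or_ge (cs.takeWhile pvP).length cs.length with h | h
  · exact h
  · exfalso
    have hle := (List.takeWhile_prefix (l := cs) pvP).length_le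
    have heq : cs.takeWhile pvP = cs :=
      (List.takeWhile_prefix pvP).eq_of_length (by omega)
    obtain ⟨c, hcmem, hcg⟩ := List.any_eq_true.1 hg
    have : pvP c = true := List.mem_takeWhile_imp (by rw [heq]; exact hcmem)
    simp [pvP, hcg] at this

theorem pv_glob_at_k : ∀ (cs : List Char), (cs.takeWhile pvP).length < cs.length →
    ∃ c, cs[(cs.takeWhile pvP).length]? = some c ∧ pvG c = true := by
  intro cs
  induction cs with
  | nil => simp
  | cons x t ih =>
    intro h
    by_cases hx : pvP x
    · simp only [List.takeWhile_cons, hx, if_true] at h ⊢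
      simp only [List.length_cons] at h ⊢
      have := ih (by omega)
      simpa using this
    · simp only [List.takeWhile_cons, hx] at h ⊢
      simp only [Bool.false_eq_true, if_false, List.length_nil]
      exact ⟨x, rfl, by simpa [pvP] using hx⟩

-- rfind.go on a singleton equals pvLastTo
theorem pv_rfind_go_single (s : List Char) (c : Char) :
    ∀ n, PySem.Chars.rfind.go s [c] n = pvLastTo s c n := by
  intro n
  induction n with
  | zero =>
    simp only [PySem.Chars.rfind.go, pvLastTo]
    by_cases h : s[0]? = some c
    · rw [if_pos (by rw [List.isPrefixOf_iff_prefix]; exact (pv_singleton_prefix_iff c s).2 h),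
        if_pos h]
    · rw [if_neg (by rw [List.isPrefixOf_iff_prefix]
                     exact fun hp => h ((pv_singleton_prefix_iff c s).1 hp)), if_neg h]
  | succ j ih =>
    show PySem.Chars.rfind.go s [c] (j + 1) = _
    rw [PySem.Chars.rfind.go, pvLastTo]
    by_cases h : s[j + 1]? = some c
    · rw [if_pos (by rw [List.isPrefixOf_iff_prefix]
                     exact (pv_singleton_prefix_iff c _).2 (by simpa [List.getElem?_drop] using h)),
          if_pos h]
      push_cast; ring
    · rw [if_neg (by rw [List.isPrefixOf_iff_prefix]
                     intro hp
                     exact h (by simpa [List.getElem?_drop] using (pv_singleton_prefix_iff c _).1 hp)),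
          if_neg h]
      exact ih

theorem pv_li_none (c : Char) : ∀ (p : List Char), pvLi? c p = none →
    ∀ (l : Nat), p[l]? ≠ some c := by
  intro p
  induction p with
  | nil => intro _ l; simp
  | cons x t ih =>
    intro h l
    simp only [pvLi?] at h
    cases hlt : pvLi? c t with
    | some j' => rw [hlt] at h; cases h
    | none =>
      rw [hlt] at h
      by_cases hx : x = c
      · rw [if_pos hx] at h; cases h
      · cases l with
        | zero => simpa using hx
        | succ l' => simpa using ih hlt l'

theorem pv_li_some (c : Char) : ∀ (p : List Char) (j : Nat), pvLi? c p = some j →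
    p[j]? = some c ∧ ∀ (l : Nat), j < l → p[l]? ≠ some c := by
  intro p
  induction p with
  | nil => simp [pvLi?]
  | cons x t ih =>
    intro j h
    simp only [pvLi?] at h
    cases hlt : pvLi? c t with
    | some j' =>
      rw [hlt] at h
      obtain ⟨h1, h2⟩ := ih j' hlt
      cases h
      refine ⟨by simpa using h1, ?_⟩
      intro l hl
      cases l with
      | zero => omega
      | succ l' => simpa using h2 l' (by omega)
    | none =>
      rw [hlt] at h
      split_ifs at h with hx
      · cases h
        subst hx
        refine ⟨by simp, ?_⟩
        intro l hl
        cases l with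
        | zero => omega
        | succ l' => simpa using pv_li_none _ _ hlt l'

theorem pv_lastTo_none (s : List Char) (c : Char) (n : Nat)
    (h : ∀ l, l ≤ n → s[l]? ≠ some c) : pvLastTo s c n = -1 := by
  induction n with
  | zero => simp [pvLastTo, h 0 (by omega)]
  | succ j ih =>
    rw [pvLastTo, if_neg (h (j + 1) (by omega))]
    exact ih fun l hl => h l (by omega)

theorem pv_lastTo_some (s : List Char) (c : Char) (j : Nat) (hj : s[j]? = some c) :
    ∀ n, j ≤ n → (∀ l, j < l → l ≤ n → s[l]? ≠ some c) → pvLastTo s c n = (j : Int) := by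
  intro n
  induction n with
  | zero =>
    intro hle _
    interval_cases j
    simp [pvLastTo, hj]
  | succ m ih =>
    intro hle hno
    by_cases hjm : j = m + 1
    · subst hjm; rw [pvLastTo, if_pos hj]; push_cast; ring
    · rw [pvLastTo, if_neg (hno (m + 1) (by omega) (by omega))]
      exact ih (by omega) fun l h1 h2 => hno l h1 (by omega)

-- rfind on a singleton, via pvLi?
theorem pv_rfind_single (p : List Char) (c : Char) :
    PySem.Chars.rfind p [c] =
      (match pvLi? c p with | some j => (j : Int) | none => -1) := by
  have : PySem.Chars.rfind p [c] = pvLastTo p c p.length := by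
    rw [PySem.Chars.rfind, pv_rfind_go_single]
  rw [this]
  cases hli : pvLi? c p with
  | some j =>
    obtain ⟨h1, h2⟩ := pv_li_some c p j hli
    have hjlt : j < p.length := (List.getElem?_eq_some_iff.1 h1).1
    exact pv_lastTo_some p c j h1 p.length (by omega) fun l hl _ => h2 l hl
  | none =>
    exact pv_lastTo_none p c p.length fun l _ => pv_li_none c p hli l

-- Source B's scan, in glob-present case
theorem pv_scan_eq : ∀ (cs : List Char) (i : Nat) (ls : Int), cs.any pvG = true →
    pvScan cs i ls =
      (((i + (cs.takeWhile pvP).length : Nat) : Int), pvLsAcc (cs.takeWhile pvP) i ls) := by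
  intro cs
  induction cs with
  | nil => simp
  | cons x t ih =>
    intro i ls hany
    by_cases hx : pvG x
    · rw [pvScan, if_pos (by simpa [pvG, List.contains_iff_mem] using hx)]
      simp [pvP, hx, pvLsAcc]
    · have hany' : t.any pvG = true := by
        rcases List.any_eq_true.1 hany with ⟨c, hc, hcg⟩
        rcases List.mem_cons.1 hc with rfl | hc
        · exact absurd hcg (by simpa using hx)
        · exact List.any_eq_true.2 ⟨c, hc, hcg⟩
      rw [pvScan, if_neg (by simpa [pvG] using hx)]
      rw [ih (i + 1) _ hany']
      simp only [List.takeWhile_cons, pvP, hx]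
      simp [pvLsAcc, Nat.add_comm, Nat.add_left_comm]

theorem pv_scan_fst (cs : List Char) (i : Nat) (ls : Int) (hg : cs.any pvG = true) :
    (pvScan cs i ls).1 = ((i + (cs.takeWhile pvP).length : Nat) : Int) := by
  rw [pv_scan_eq _ _ _ hg]

theorem pv_scan_snd (cs : List Char) (i : Nat) (ls : Int) (hg : cs.any pvG = true) :
    (pvScan cs i ls).2 = pvLsAcc (cs.takeWhile pvP) i ls := by
  rw [pv_scan_eq _ _ _ hg]

theorem pv_scan_fst_none : ∀ (cs : List Char) (i : Nat) (ls : Int), cs.any pvG = false →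
    (pvScan cs i ls).1 = -1 := by
  intro cs
  induction cs with
  | nil => intro _ _ _; simp [pvScan]
  | cons x t ih =>
    intro i ls hany
    simp only [List.any_cons, Bool.or_eq_false_iff] at hany
    rw [pvScan, if_neg (by simp [pvG] at hany; simpa [List.contains_iff_mem] using hany.1)]
    exact ih _ _ hany.2

theorem pv_lsAcc_eq : ∀ (p : List Char) (i : Nat) (ls : Int),
    pvLsAcc p i ls = (match pvLi? '/' p with | some j => ((i + j : Nat) : Int) | none => ls) := by
  intro p
  induction p with
  | nil => simp [pvLsAcc, pvLi?]
  | cons x t ih =>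
    intro i ls
    rw [pvLsAcc, ih]
    simp only [pvLi?]
    cases hlt : pvLi? '/' t with
    | some j => push_cast; ring_nf
    | none =>
      by_cases hx : x = '/'
      · simp [hx]
      · simp [hx]

-- common characterisation of both results, on code points
def pvF (cs : List Char) : List Char :=
  if cs.any pvG = false then cs
  else
    match pvLi? '/' (cs.takeWhile pvP) with
    | some j => cs.take (j + 1)
    | none => if (cs.takeWhile pvP).length ≠ 0 then cs.take (cs.takeWhile pvP).length else cs

theorem pv_B_char (pattern : String) :
    (token_from_pattern_alt pattern).toList = pvF pattern.toList := by
  by_cases hg : pattern.toList.any pvG = true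
  · unfold token_from_pattern_alt
    simp only [pv_scan_fst _ _ _ hg, pv_scan_snd _ _ _ hg, pv_lsAcc_eq]
    rw [if_neg (show ¬((((0 + (pattern.toList.takeWhile pvP).length : Nat)) : Int) < 0) by
      push_cast; omega)]
    cases hli : pvLi? '/' (pattern.toList.takeWhile pvP) with
    | some j =>
      have hrhs : pvF pattern.toList = pattern.toList.take (j + 1) := by
        unfold pvF
        rw [if_neg (by simp [hg]), hli]
      simp only [hli]
      rw [hrhs, if_pos (show (((0 + j : Nat) : Int)) ≥ 0 by push_cast; omega)]
      rw [PySem.Str.toList_slice, PySem.Chars.slice_eq_listSlice]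
      rw [(show ((0 + j : Nat) : Int) + 1 = ((j + 1 : Nat) : Int) by push_cast; omega),
        PySem.List.slice_to_natCast]
    | none =>
      simp only [hli]
      rw [if_neg (show ¬((-1 : Int) ≥ 0) by omega)]
      by_cases hk : (pattern.toList.takeWhile pvP).length = 0
      · have hrhs : pvF pattern.toList = pattern.toList := by
          unfold pvF
          rw [if_neg (by simp [hg]), hli, if_neg (by omega)]
        rw [hrhs, if_neg (show ¬((((0 + (pattern.toList.takeWhile pvP).length : Nat)) : Int) > 0) by
          push_cast; omega)]
      · have hrhs : pvF pattern.toList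
            = pattern.toList.take (pattern.toList.takeWhile pvP).length := by
          unfold pvF
          rw [if_neg (by simp [hg]), hli, if_pos (by omega)]
        rw [hrhs, if_pos (show (((0 + (pattern.toList.takeWhile pvP).length : Nat)) : Int) > 0 by
          push_cast; omega)]
        rw [PySem.Str.toList_slice, PySem.Chars.slice_eq_listSlice]
        rw [(show ((0 + (pattern.toList.takeWhile pvP).length : Nat) : Int)
            = (((pattern.toList.takeWhile pvP).length : Nat) : Int) by push_cast; omega),
          PySem.List.slice_to_natCast]
  · have hg' : pattern.toList.any pvG = false := by
      cases h : pattern.toList.any pvG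
      · rfl
      · exact absurd h hg
    unfold token_from_pattern_alt pvF
    simp only [pv_scan_fst_none _ _ _ hg']
    rw [if_pos (show ((-1 : Int) < 0) by norm_num), if_pos hg']

theorem pv_A_char (pattern : String) :
    (token_from_pattern pattern).toList = pvF pattern.toList := by
  by_cases hg : pattern.toList.any pvG = true
  · have hgb : has_glob pattern = true := (pv_has_glob_iff pattern).2 hg
    have hklt := pv_k_lt pattern.toList hg
    obtain ⟨c0, hc0get, hc0g⟩ := pv_glob_at_k pattern.toList hklt
    have hc0mem : c0 ∈ pattern.toList := by
      obtain ⟨h, rfl⟩ := List.getElem?_eq_some_iff.1 hc0get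
      exact List.getElem_mem h
    -- the first glob char's first-occurrence index is exactly the takeWhile length
    have hfind0 : PySem.Chars.find pattern.toList [c0]
        = ((pattern.toList.takeWhile pvP).length : Int) := by
      obtain ⟨j, hj, hjget, hjmin⟩ := pv_find_singleton pattern.toList c0 hc0mem
      have hjk : j = (pattern.toList.takeWhile pvP).length := by
        rcases Nat.lt_trichotomy j (pattern.toList.takeWhile pvP).length with h | h | h
        · exact absurd (pv_tw_not_glob pattern.toList j h hjget) (by simp [hc0g])
        · exact h
        · exact absurd hc0get (hjmin _ h)
      rw [hj, hjk]
    -- min of A's index list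
    have hmin : PySem.List.min?
        ((pvGlobChars.filter fun c => PySem.Str.isIn (String.ofList [c]) pattern).map
          fun c => PySem.Str.find pattern (String.ofList [c])) id
        = some ((pattern.toList.takeWhile pvP).length : Int) := by
      have hc0in : PySem.Str.find pattern (String.ofList [c0]) ∈
          (pvGlobChars.filter fun c => PySem.Str.isIn (String.ofList [c]) pattern).map
            fun c => PySem.Str.find pattern (String.ofList [c]) := by
        refine List.mem_map.2 ⟨c0, List.mem_filter.2 ⟨?_, ?_⟩, rfl⟩
        · simpa [pvG, List.contains_iff_mem] using hc0g
        · rw [PySem.Str.isIn_iff_infix]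
          simpa using (pv_singleton_infix_iff c0 pattern.toList).2 hc0mem
      cases hm : PySem.List.min?
          ((pvGlobChars.filter fun c => PySem.Str.isIn (String.ofList [c]) pattern).map
            fun c => PySem.Str.find pattern (String.ofList [c])) id with
      | none =>
        rw [PySem.List.min?_eq_none_iff] at hm
        rw [hm] at hc0in
        cases hc0in
      | some m =>
        have hle : m ≤ ((pattern.toList.takeWhile pvP).length : Int) := by
          have := PySem.List.min?_isMin hm _ hc0in
          simpa [PySem.Str.find_eq, hfind0] using this
        have hge : ((pattern.toList.takeWhile pvP).length : Int) ≤ m := by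
          have hmem := PySem.List.min?_mem hm
          obtain ⟨c, hcf, hcv⟩ := List.mem_map.1 hmem
          obtain ⟨hcG, hcIn⟩ := List.mem_filter.1 hcf
          have hcg : pvG c = true := by simpa [pvG, List.contains_iff_mem] using hcG
          have hcmem : c ∈ pattern.toList := by
            rw [PySem.Str.isIn_iff_infix] at hcIn
            exact (pv_singleton_infix_iff c pattern.toList).1 (by simpa using hcIn)
          obtain ⟨j, hj, hjget, _⟩ := pv_find_singleton pattern.toList c hcmem
          have hjk : (pattern.toList.takeWhile pvP).length ≤ j := by
            by_contra h
            exact absurd (pv_tw_not_glob pattern.toList j (by omega) hjget) (by simp [hcg])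
          rw [← hcv, PySem.Str.find_eq, (by simp : (String.ofList [c]).toList = [c]), hj]
          exact_mod_cast hjk
        exact congrArg some (le_antisymm hle hge)
    unfold token_from_pattern
    rw [hgb, if_neg (show ¬((!(true : Bool)) = true) by simp)]
    simp only []
    rw [hmin, Option.getD_some]
    have hpretl : (PySem.Str.slice pattern none
        (some ((pattern.toList.takeWhile pvP).length : Int))).toList
        = pattern.toList.takeWhile pvP := by
      rw [PySem.Str.toList_slice, PySem.Chars.slice_eq_listSlice, PySem.List.slice_to_natCast]
      exact (pv_tw_eq_take pattern.toList).symm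
    have hslash : PySem.Str.rfind (PySem.Str.slice pattern none
        (some ((pattern.toList.takeWhile pvP).length : Int))) "/"
        = (match pvLi? '/' (pattern.toList.takeWhile pvP) with
           | some j => (j : Int) | none => -1) := by
      rw [PySem.Str.rfind_eq, hpretl, (by decide : ("/" : String).toList = ['/']),
        pv_rfind_single]
    cases hli : pvLi? '/' (pattern.toList.takeWhile pvP) with
    | some j =>
      simp only [hli] at hslash
      have hrhs : pvF pattern.toList = pattern.toList.take (j + 1) := by
        unfold pvF
        rw [if_neg (by simp [hg]), hli]
      rw [hrhs, hslash, if_pos (show ((j : Int) ≥ 0) from Int.natCast_nonneg j)]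
      have hjlt : j < (pattern.toList.takeWhile pvP).length :=
        (List.getElem?_eq_some_iff.1 (pv_li_some '/' _ j hli).1).1
      rw [PySem.Str.toList_slice, PySem.Chars.slice_eq_listSlice]
      have hcast : ((j : Int) + 1) = ((j + 1 : Nat) : Int) := by push_cast; ring
      rw [hcast, PySem.List.slice_to_natCast, hpretl]
      rw [pv_tw_eq_take pattern.toList, List.take_take]
      rw [Nat.min_eq_left (by omega)]
    | none =>
      simp only [hli] at hslash
      rw [hslash, if_neg (show ¬((-1 : Int) ≥ 0) by norm_num)]
      by_cases hk : (pattern.toList.takeWhile pvP).length = 0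
      · have hrhs : pvF pattern.toList = pattern.toList := by
          unfold pvF
          rw [if_neg (by simp [hg]), hli, if_neg (by omega)]
        rw [hrhs, if_neg ?_]
        rw [ne_eq, not_not, ← String.toList_inj, hpretl]
        rw [List.length_eq_zero_iff] at hk
        simp [hk]
      · have hrhs : pvF pattern.toList
            = pattern.toList.take (pattern.toList.takeWhile pvP).length := by
          unfold pvF
          rw [if_neg (by simp [hg]), hli, if_pos (by omega)]
        rw [hrhs, if_pos ?_]
        · rw [hpretl]
          exact pv_tw_eq_take pattern.toList
        · rw [ne_eq, ← String.toList_inj, hpretl]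
          intro h
          rw [List.length_eq_zero_iff] at hk
          exact hk (by simpa using h)
  · have hgbf : has_glob pattern = false := by
      cases h : has_glob pattern
      · rfl
      · exact absurd ((pv_has_glob_iff pattern).1 h) hg
    have hg' : pattern.toList.any pvG = false := by
      cases h : pattern.toList.any pvG
      · rfl
      · exact absurd h hg
    unfold token_from_pattern pvF
    rw [hgbf, if_pos hg']
    simp

-- ===== VERDICT (by name: the statement is the Claim_ definition above) =====
theorem token_from_pattern_spec : Claim_equal_token_from_pattern := by
  intro pattern _
  unfold Spec_token_from_pattern
  rw [← String.toList_inj, pv_A_char, pv_B_char]
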